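-- pv_equiv track=rewrite | github.com/CapBarnacle/MarkBridge | src/markbridge/parsers/basic.py | _suppress_docx_horizontal_merge_duplicates
-- ===== SOURCE A (Python) =====
-- def _suppress_docx_horizontal_merge_duplicates(rows: list[list[str]]) -> tuple[list[list[str]], bool]:
--     normalized = [row[:] for row in rows]
--     changed = False
--
--     for row in normalized:
--         for column_index in range(1, len(row)):
--             current = row[column_index].strip()
--             previous = row[column_index - 1].strip()
--             if not current or current != previous:
--                 continue
--             if not any(value.strip() for value in row[column_index + 1:]):
--                 continue
--             row[column_index] = ""
--             changed = True
--
--     return normalized, changed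
-- ===== SOURCE B (Python) =====
-- def _clean_row(row):
--     n = len(row)
--     # suffix[i]: some cell at index >= i has non-whitespace content (one backward pass)
--     suffix = [False] * (n + 1)
--     for i in range(n - 1, -1, -1):
--         suffix[i] = suffix[i + 1] or bool(row[i].strip())
--     if not row:
--         return [], False
--     out = [row[0]]
--     prev = row[0].strip()
--     changed = False
--     for i in range(1, n):
--         cur = row[i].strip()
--         if cur and cur == prev and suffix[i + 1]:
--             out.append("")
--             prev = ""
--             changed = True
--         else:
--             out.append(row[i])
--             prev = cur
--     return out, changed
--
--
-- def _suppress_docx_horizontal_merge_duplicates(rows: list[list[str]]) -> tuple[list[list[str]], bool]: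
--     results = [_clean_row(row) for row in rows]
--     return [r for r, _ in results], any(ch for _, ch in results)
-- ===== Notes on version B (the rewrite author's own statement) =====
-- stated objective: faster
-- what changed: Replaced the per-cell rescans of the rest of the row (any(... row[i+1:]) inside the loop) by one backward pass precomputing a suffix 'non-empty to the right' table plus one forward pass carrying the previous stripped value, building each row fresh instead of mutating a copy.
import Mathlib
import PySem

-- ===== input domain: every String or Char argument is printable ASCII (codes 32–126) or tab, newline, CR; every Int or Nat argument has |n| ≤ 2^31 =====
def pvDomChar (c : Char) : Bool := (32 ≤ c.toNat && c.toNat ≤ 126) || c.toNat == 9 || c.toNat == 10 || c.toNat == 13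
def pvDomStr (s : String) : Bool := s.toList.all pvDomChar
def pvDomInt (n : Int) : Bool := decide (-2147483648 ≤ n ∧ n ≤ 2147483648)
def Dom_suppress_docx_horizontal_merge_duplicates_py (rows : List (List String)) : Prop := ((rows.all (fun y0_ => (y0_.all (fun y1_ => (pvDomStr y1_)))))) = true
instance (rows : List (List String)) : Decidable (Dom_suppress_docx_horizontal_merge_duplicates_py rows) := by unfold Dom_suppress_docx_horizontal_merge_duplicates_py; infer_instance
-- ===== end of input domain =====

-- B replaces A's inner right-scan per cell by a precomputed suffix table, one backward + one forward pass per row (asymptotically faster).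

-- ===== PORT A =====
-- the body of A's inner 'for column_index in range(1, len(row))' loop (mutating the row copy in place)
def pvAStep (st : List String × Bool) (i : Int) : List String × Bool :=
  let row := st.1
  let current := PySem.Str.strip (PySem.List.pyGetD row i "")
  let previous := PySem.Str.strip (PySem.List.pyGetD row (i - 1) "")
  if current = "" ∨ current ≠ previous then st
  else if ¬ ((PySem.List.slice row (some (i + 1)) none).any (fun v => !(PySem.Str.strip v == ""))) then st
  else (row.set i.toNat "", true)

def pvARow (row : List String) : List String × Bool :=
  (PySem.List.pyRange 1 (row.length : Int) 1).foldl pvAStep (row, false)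

def suppress_docx_horizontal_merge_duplicates_py (rows : List (List String)) : List (List String) × Bool :=
  let normalized := rows.map (fun row => row)
  normalized.foldl (fun (acc : List (List String) × Bool) row =>
    let res := pvARow row
    (acc.1 ++ [res.1], acc.2 || res.2)) ([], false)

-- ===== PORT B =====
-- suffix[i] table built back to front: entry i says 'some cell at index ≥ i has non-whitespace content'
def pvSuffixFlags (row : List String) : List Bool :=
  match row with
  | [] => [false]
  | c :: rest =>
    let s := pvSuffixFlags rest
    ((s.headD false) || !(PySem.Str.strip c == "")) :: s

-- forward pass: cells from index 1 on, paired with suffix[i+1] flags, carrying prev stripped value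
def pvBrowGo : List String → List Bool → String → List String × Bool
  | [], _, _ => ([], false)
  | c :: cs, [], _ => (c :: cs, false)   -- unreachable: flags list always has the same length as the cells list
  | c :: cs, f :: fs, prev =>
    let cur := PySem.Str.strip c
    if cur ≠ "" ∧ cur = prev ∧ f = true then
      (("" : String) :: (pvBrowGo cs fs "").1, true)
    else
      let r := pvBrowGo cs fs cur
      (c :: r.1, r.2)

def pvBrow (row : List String) : List String × Bool :=
  match row with
  | [] => ([], false)
  | c0 :: rest =>
    let flags := (pvSuffixFlags (c0 :: rest)).drop 2
    let r := pvBrowGo rest flags (PySem.Str.strip c0)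
    (c0 :: r.1, r.2)

def suppress_docx_horizontal_merge_duplicates_py_alt (rows : List (List String)) : List (List String) × Bool :=
  let results := rows.map pvBrow
  (results.map Prod.fst, results.any Prod.snd)

-- ===== PRECONDITION & SPEC =====
def Spec_suppress_docx_horizontal_merge_duplicates_py (rows : List (List String)) (out : List (List String) × Bool) : Prop := out = suppress_docx_horizontal_merge_duplicates_py_alt rows
instance (rows : List (List String)) (out : List (List String) × Bool) : Decidable (Spec_suppress_docx_horizontal_merge_duplicates_py rows out) := by unfold Spec_suppress_docx_horizontal_merge_duplicates_py; infer_instance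

-- ===== CLAIM (what is proved, stated in full; the proofs are below) =====
def Claim_equal_suppress_docx_horizontal_merge_duplicates_py : Prop := ∀ (rows : List (List String)), Dom_suppress_docx_horizontal_merge_duplicates_py rows → Spec_suppress_docx_horizontal_merge_duplicates_py rows (suppress_docx_horizontal_merge_duplicates_py rows)

-- ===== LEMMAS AND PROOFS =====

lemma pvSuffixFlags_headD (xs : List String) :
    (pvSuffixFlags xs).headD false = xs.any (fun v => !(PySem.Str.strip v == "")) := by
  induction xs with
  | nil => simp [pvSuffixFlags]
  | cons c cs ih =>
    simp only [pvSuffixFlags, List.headD_cons]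
    rw [ih, Bool.or_comm, List.any_cons]


lemma pv_set_append (pre : List String) (c x : String) (cs : List String) :
    (pre ++ c :: cs).set pre.length x = pre ++ x :: cs := by
  induction pre with
  | nil => rfl
  | cons a as ih => simp only [List.cons_append, List.length_cons, List.set_cons_succ, ih]

lemma pv_getLast_append (pre : List String) (x : String) (h : pre ++ [x] ≠ []) :
    (pre ++ [x]).getLast h = x := by
  simp

lemma pvRow_loop_eq (rest : List String) :
    ∀ (pre : List String) (ch : Bool) (h : pre ≠ []),
    (PySem.List.pyRange (pre.length : Int) ((pre.length + rest.length : Nat) : Int) 1).foldl pvAStep (pre ++ rest, ch)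
      = (pre ++ (pvBrowGo rest ((pvSuffixFlags rest).drop 1) (PySem.Str.strip (pre.getLast h))).1,
         ch || (pvBrowGo rest ((pvSuffixFlags rest).drop 1) (PySem.Str.strip (pre.getLast h))).2) := by
  induction rest with
  | nil =>
    intro pre ch h
    rw [PySem.List.pyRange_one_eq_nil (by simp)]
    simp [pvBrowGo]
  | cons c cs ih =>
    intro pre ch h
    have hp : 0 < pre.length := List.length_pos_iff.mpr h
    obtain ⟨f, fs, hffs⟩ : ∃ f fs, pvSuffixFlags cs = f :: fs := by
      cases cs <;> exact ⟨_, _, rfl⟩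
    have hf : f = cs.any (fun v => !(PySem.Str.strip v == "")) := by
      have h0 := pvSuffixFlags_headD cs
      rw [hffs] at h0
      simpa using h0
    have hlt : (pre.length : Int) < ((pre.length + (c :: cs).length : Nat) : Int) := by
      simp only [List.length_cons]; omega
    rw [PySem.List.pyRange_one_cons hlt, List.foldl_cons]
    have hdrop : (pvSuffixFlags (c :: cs)).drop 1 = f :: fs := by
      simp [pvSuffixFlags, hffs]
    have h1 : PySem.List.pyGetD (pre ++ c :: cs) (pre.length : Int) "" = c := by
      rw [PySem.List.pyGetD_natCast]
      simp [List.getD]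
    have h2 : PySem.List.pyGetD (pre ++ c :: cs) ((pre.length : Int) - 1) "" = pre.getLast h := by
      rw [show ((pre.length : Int) - 1) = ((pre.length - 1 : Nat) : Int) by omega]
      rw [PySem.List.pyGetD_natCast]
      rw [List.getD_eq_getElem?_getD, List.getElem?_append_left (by omega)]
      rw [List.getElem?_eq_getElem (by omega)]
      rw [List.getLast_eq_getElem]
      rfl
    have h3 : PySem.List.slice (pre ++ c :: cs) (some ((pre.length : Int) + 1)) none = cs := by
      rw [show ((pre.length : Int) + 1) = ((pre.length + 1 : Nat) : Int) by omega]
      rw [PySem.List.slice_from_natCast]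
      rw [show pre ++ c :: cs = (pre ++ [c]) ++ cs by simp]
      rw [show pre.length + 1 = (pre ++ [c]).length by simp]
      exact List.drop_left
    have h4 : (pre ++ c :: cs).set ((pre.length : Int)).toNat "" = pre ++ "" :: cs := by
      rw [Int.toNat_natCast]
      exact pv_set_append pre c "" cs
    have hb1 : ((pre.length : Int) + 1) = (((pre ++ [c]).length : Nat) : Int) := by
      simp
    have hb2 : ((pre.length + (c :: cs).length : Nat) : Int) = (((pre ++ [c]).length + cs.length : Nat) : Int) := by
      simp; omega
    have hassoc : pre ++ c :: cs = (pre ++ [c]) ++ cs := by simp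
    by_cases hkeep : PySem.Str.strip c ≠ "" ∧ PySem.Str.strip c = PySem.Str.strip (pre.getLast h)
        ∧ cs.any (fun v => !(PySem.Str.strip v == "")) = true
    · -- A blanks the cell; B's forward pass blanks it too
      have hstep : pvAStep (pre ++ c :: cs, ch) (pre.length : Int) = (pre ++ "" :: cs, true) := by
        simp only [pvAStep, h1, h2, h3, h4]
        split_ifs with g1 g2
        · exact absurd g1 (by push_neg; exact ⟨hkeep.1, hkeep.2.1⟩)
        · rfl
        · exact absurd hkeep.2.2 g2
      have hI := ih (pre ++ [""]) true (by simp)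
      rw [pv_getLast_append] at hI
      simp only [List.length_append, List.length_singleton] at hI
      rw [hstep]
      rw [show ((pre.length : Int) + 1) = ((pre.length + 1 : Nat) : Int) by omega]
      rw [show ((pre.length + (c :: cs).length : Nat) : Int) = ((pre.length + 1 + cs.length : Nat) : Int) by push_cast [List.length_cons]; omega]
      rw [show pre ++ "" :: cs = (pre ++ [""]) ++ cs by simp]
      rw [hI]
      rw [hdrop]
      simp only [pvBrowGo]
      rw [if_pos ⟨hkeep.1, hkeep.2.1, by rw [hf]; exact hkeep.2.2⟩]
      have hse : PySem.Str.strip "" = "" := by decide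
      rw [hse, hffs]
      simp
    · -- A leaves the cell; B keeps it and carries the stripped value
      have hstep : pvAStep (pre ++ c :: cs, ch) (pre.length : Int) = (pre ++ c :: cs, ch) := by
        simp only [pvAStep, h1, h2, h3]
        split_ifs with g1 g2
        · rfl
        · exfalso
          push_neg at g1
          exact hkeep ⟨g1.1, g1.2, g2⟩
        · rfl
      have hI := ih (pre ++ [c]) ch (by simp)
      rw [pv_getLast_append] at hI
      simp only [List.length_append, List.length_singleton] at hI
      rw [hstep]
      rw [show ((pre.length : Int) + 1) = ((pre.length + 1 : Nat) : Int) by omega]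
      rw [show ((pre.length + (c :: cs).length : Nat) : Int) = ((pre.length + 1 + cs.length : Nat) : Int) by push_cast [List.length_cons]; omega]
      rw [hassoc, hI]
      rw [hdrop]
      simp only [pvBrowGo]
      rw [if_neg (by
        intro hx
        exact hkeep ⟨hx.1, hx.2.1, by rw [← hf]; exact hx.2.2⟩)]
      rw [hffs]
      simp

lemma pvARow_eq_pvBrow (row : List String) : pvARow row = pvBrow row := by
  cases row with
  | nil =>
    unfold pvARow pvBrow
    rw [PySem.List.pyRange_one_eq_nil (by simp)]
    rfl
  | cons c0 rest =>
    unfold pvARow pvBrow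
    have hflags : (pvSuffixFlags (c0 :: rest)).drop 2 = (pvSuffixFlags rest).drop 1 := by
      simp only [pvSuffixFlags, List.drop_succ_cons]
    have h := pvRow_loop_eq rest [c0] false (by simp)
    simp only [List.length_cons, List.length_nil, List.singleton_append, List.getLast_singleton,
      Nat.zero_add, Nat.cast_one] at h ⊢
    rw [show ((rest.length + 1 : Nat) : Int) = ((1 + rest.length : Nat) : Int) by omega]
    rw [hflags, h]
    simp


lemma pvFold_eq (rows : List (List String)) :
    ∀ (acc : List (List String)) (ch : Bool),
    rows.foldl (fun (acc : List (List String) × Bool) row =>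
        let res := pvARow row
        (acc.1 ++ [res.1], acc.2 || res.2)) (acc, ch)
      = (acc ++ (rows.map pvBrow).map Prod.fst, ch || (rows.map pvBrow).any Prod.snd) := by
  induction rows with
  | nil => intro acc ch; simp
  | cons r rs ih =>
    intro acc ch
    simp only [List.foldl_cons, List.map_cons, List.any_cons]
    rw [ih, pvARow_eq_pvBrow]
    simp [Bool.or_assoc]

-- ===== VERDICT (by name: the statement is the Claim_ definition above) =====
theorem suppress_docx_horizontal_merge_duplicates_py_spec : Claim_equal_suppress_docx_horizontal_merge_duplicates_py := by
  intro rows _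
  unfold Spec_suppress_docx_horizontal_merge_duplicates_py
  unfold suppress_docx_horizontal_merge_duplicates_py suppress_docx_horizontal_merge_duplicates_py_alt
  simp only [List.map_id']
  rw [pvFold_eq]
  simp
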